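-- pv_equiv track=rewrite | github.com/abdreams/CompetitiveProgramming | D_Smithing_Skill.py | max_experience
-- ===== SOURCE A (Python) =====
-- import heapq
--
-- def max_experience(n, m, a, b, c):
--     gains = []
--     for i in range(n):
--         gains.append((a[i] - b[i], a[i], b[i]))
--
--
--     heapq.heapify(gains)
--
--     total_experience = 0
--
--     while m > 0 and gains:
--         net_gain, ai, bi = heapq.heappop(gains)
--
--         craftable = min(m, c[0] // ai)
--
--         total_experience += craftable
--
--         c[0] -= craftable * ai
--         c[0] += craftable * bi
--
--
--         if craftable > 0:
--             heapq.heappush(gains, (ai - bi, ai, bi))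
--
--         m -= craftable
--
--     return total_experience
-- ===== SOURCE B (Python) =====
-- def max_experience(n, m, a, b, c):
--     items = sorted((a[i] - b[i], a[i], b[i]) for i in range(n))
--     total = 0
--     if not items or m <= 0:
--         return 0
--     cur = c[0]
--     for net, ai, bi in items:
--         while m > 0:
--             k = min(m, cur // ai)
--             total += k
--             cur -= k * net
--             m -= k
--             if k <= 0:
--                 break
--     c[0] = cur
--     return total
-- ===== Notes on version B (the rewrite author's own statement) =====
-- stated objective: simpler
-- what changed: Replaces the heap (heapify + pop/push-back loop) with a single upfront sort and a plain two-level scan: each item is processed to exhaustion in sorted (net, a, b) order, so the priority queue and the re-push of the current item disappear.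
-- outside the precondition, e.g. on max_experience(2, 1, [1, 0], [0, -5], [10]): A returns 1, B returns 1
import Mathlib
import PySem

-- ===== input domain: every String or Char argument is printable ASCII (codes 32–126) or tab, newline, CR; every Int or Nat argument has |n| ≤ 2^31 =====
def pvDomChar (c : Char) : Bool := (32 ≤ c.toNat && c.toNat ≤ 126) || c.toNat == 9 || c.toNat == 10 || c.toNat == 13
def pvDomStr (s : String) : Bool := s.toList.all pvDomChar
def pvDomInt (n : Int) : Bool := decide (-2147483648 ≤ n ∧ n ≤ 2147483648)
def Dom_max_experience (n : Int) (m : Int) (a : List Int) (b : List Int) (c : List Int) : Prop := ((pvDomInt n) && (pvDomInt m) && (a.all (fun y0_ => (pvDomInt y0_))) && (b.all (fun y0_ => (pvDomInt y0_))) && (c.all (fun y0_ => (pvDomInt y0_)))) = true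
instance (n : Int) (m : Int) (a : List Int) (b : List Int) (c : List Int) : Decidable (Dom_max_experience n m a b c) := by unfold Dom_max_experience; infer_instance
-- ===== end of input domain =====

-- B replaces A's heap with one sort plus a two-level scan (objective: simpler); both mutate c[0]
-- identically where the loop runs, and the theorems below are about the return value.

-- ===== PORT A =====
-- Python compares the heap's (net, a, b) tuples lexicographically; pvKey is that exact order.
def pvKey (t : Int × Int × Int) : Lex (Int × Lex (Int × Int)) := toLex (t.1, toLex (t.2.1, t.2.2))

-- Hand model of heapq (PySem has no heap): heappop returns the smallest tuple, heappush adds one.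
-- Exact for A: tuples with equal keys are identical values, and A's result depends only on the
-- multiset of stored tuples (proved below), never on the heap's internal array layout.
def pvPopMin : List (Int × Int × Int) → Option ((Int × Int × Int) × List (Int × Int × Int))
  | [] => none
  | x :: xs =>
    match pvPopMin xs with
    | none => some (x, xs)
    | some (g, rest) => if pvKey x ≤ pvKey g then some (x, xs) else some (g, x :: rest)

-- termination helper for pvLoopA (cited in decreasing_by)
theorem pvPopMin_length : ∀ (l : List (Int × Int × Int)) g rest,
    pvPopMin l = some (g, rest) → rest.length + 1 = l.length := by
  intro l
  induction l with
  | nil => intro g rest h; simp [pvPopMin] at h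
  | cons x xs ih =>
    intro g rest h
    simp only [pvPopMin] at h
    cases hx : pvPopMin xs with
    | none => rw [hx] at h; simp at h; simp [← h.2]
    | some p =>
      rw [hx] at h
      by_cases hle : pvKey x ≤ pvKey p.1
      · simp [hle] at h; simp [← h.2]
      · simp [hle] at h
        have := ih p.1 p.2 (by rw [hx])
        rw [← h.2]
        simp at this ⊢
        omega

-- the while loop of A: while m > 0 and gains: pop min; craftable; update; push back if positive
def pvLoopA (m c0 : Int) (gains : List (Int × Int × Int)) (total : Int) : Int :=
  if 0 < m then
    match hp : pvPopMin gains with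
    | none => total
    | some ((net, ai, bi), rest) =>
      let k := min m (PySem.Int.floordiv c0 ai)
      if 0 < k then
        pvLoopA (m - k) (c0 - k * ai + k * bi) (rest ++ [(ai - bi, ai, bi)]) (total + k)
      else
        pvLoopA (m - k) (c0 - k * ai + k * bi) rest (total + k)
  else total
termination_by (gains.length, m.toNat)
decreasing_by
  · have hl := pvPopMin_length gains _ _ hp
    have : (rest ++ [(ai - bi, ai, bi)]).length = gains.length := by simp; omega
    rw [this]
    apply Prod.Lex.right
    omega
  · have hl := pvPopMin_length gains _ _ hp
    apply Prod.Lex.left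
    omega

def max_experience (n : Int) (m : Int) (a : List Int) (b : List Int) (c : List Int) : Int :=
  let gains := (PySem.List.pyRange 0 n 1).map (fun i =>
    (PySem.List.pyGetD a i 0 - PySem.List.pyGetD b i 0, PySem.List.pyGetD a i 0, PySem.List.pyGetD b i 0))
  pvLoopA m (PySem.List.pyGetD c 0 0) gains 0

-- ===== PORT B =====
-- inner 'while m > 0' loop of Source B; state (m, cur, total)
def pvInner (net ai m cur total : Int) : Int × Int × Int :=
  if 0 < m then
    let k := min m (PySem.Int.floordiv cur ai)
    if 0 < k then pvInner net ai (m - k) (cur - k * net) (total + k)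
    else (m - k, cur - k * net, total + k)
  else (m, cur, total)
termination_by m.toNat
decreasing_by omega

-- outer 'for net, ai, bi in items' loop of Source B
def pvOuter (items : List (Int × Int × Int)) (s : Int × Int × Int) : Int × Int × Int :=
  items.foldl (fun s t => pvInner t.1 t.2.1 s.1 s.2.1 s.2.2) s

def max_experience_alt (n : Int) (m : Int) (a : List Int) (b : List Int) (c : List Int) : Int :=
  let items := PySem.List.sorted ((PySem.List.pyRange 0 n 1).map (fun i =>
    (PySem.List.pyGetD a i 0 - PySem.List.pyGetD b i 0, PySem.List.pyGetD a i 0, PySem.List.pyGetD b i 0))) pvKey false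
  if items = [] ∨ m ≤ 0 then 0
  else (pvOuter items (m, PySem.List.pyGetD c 0 0, 0)).2.2

-- ===== PRECONDITION & SPEC =====
-- Pre_ excludes the inputs where Python A raises: n beyond len(a)/len(b) (IndexError), and — when the
-- while loop is entered (n > 0 and m > 0) — an empty c (IndexError on c[0]) or a zero a[i]
-- (ZeroDivisionError). Requiring every a[i] ≠ 0 is slightly wider than the raising set: when m is
-- exhausted before a zero-a item is popped, A returns and B returns the same value (see cites).
def Pre_max_experience (n : Int) (m : Int) (a : List Int) (b : List Int) (c : List Int) : Prop :=
  n ≤ (a.length : Int) ∧ n ≤ (b.length : Int) ∧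
  (n ≤ 0 ∨ m ≤ 0 ∨ (c ≠ [] ∧ ∀ i : Nat, i < n.toNat → a.getD i 0 ≠ 0))
instance (n : Int) (m : Int) (a : List Int) (b : List Int) (c : List Int) : Decidable (Pre_max_experience n m a b c) := by unfold Pre_max_experience; infer_instance

def pvWitness_max_experience : Int × Int × List Int × List Int × List Int := (2, 3, [5, 3], [3, 1], [10])

def Spec_max_experience (n : Int) (m : Int) (a : List Int) (b : List Int) (c : List Int) (out : Int) : Prop := out = max_experience_alt n m a b c
instance (n : Int) (m : Int) (a : List Int) (b : List Int) (c : List Int) (out : Int) : Decidable (Spec_max_experience n m a b c out) := by unfold Spec_max_experience; infer_instance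

-- ===== CLAIM (what is proved, stated in full; the proofs are below) =====
def Claim_equal_max_experience : Prop := ∀ (n : Int) (m : Int) (a : List Int) (b : List Int) (c : List Int), Dom_max_experience n m a b c → Pre_max_experience n m a b c → Spec_max_experience n m a b c (max_experience n m a b c)

-- ===== LEMMAS AND PROOFS =====

theorem pvKey_injective : Function.Injective pvKey := by
  intro x y h
  obtain ⟨x1, x2, x3⟩ := x; obtain ⟨y1, y2, y3⟩ := y
  simpa [pvKey, toLex, Prod.ext_iff] using h

theorem pvPopMin_none_iff (l : List (Int × Int × Int)) : pvPopMin l = none ↔ l = [] := by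
  cases l with
  | nil => simp [pvPopMin]
  | cons x xs =>
    simp only [pvPopMin]
    cases pvPopMin xs with
    | none => simp
    | some p => by_cases h : pvKey x ≤ pvKey p.1 <;> simp [h]

theorem pvPopMin_perm : ∀ (l : List (Int × Int × Int)) g rest,
    pvPopMin l = some (g, rest) → l.Perm (g :: rest) := by
  intro l
  induction l with
  | nil => intro g rest h; simp [pvPopMin] at h
  | cons x xs ih =>
    intro g rest h
    simp only [pvPopMin] at h
    cases hx : pvPopMin xs with
    | none =>
      rw [hx] at h; simp at h
      obtain ⟨h1, h2⟩ := h; subst h1; subst h2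
      exact List.Perm.refl _
    | some p =>
      obtain ⟨q, qrest⟩ := p
      rw [hx] at h
      by_cases hle : pvKey x ≤ pvKey q
      · simp [hle] at h
        obtain ⟨h1, h2⟩ := h; subst h1; subst h2
        exact List.Perm.refl _
      · simp [hle] at h
        obtain ⟨h1, h2⟩ := h; subst h1; subst h2
        exact (List.Perm.cons x (ih q qrest hx)).trans (List.Perm.swap q x qrest)

theorem pvPopMin_min : ∀ (l : List (Int × Int × Int)) g rest,
    pvPopMin l = some (g, rest) → ∀ y ∈ l, pvKey g ≤ pvKey y := by
  intro l
  induction l with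
  | nil => intro g rest h; simp [pvPopMin] at h
  | cons x xs ih =>
    intro g rest h y hy
    simp only [pvPopMin] at h
    cases hx : pvPopMin xs with
    | none =>
      rw [hx] at h; simp at h
      obtain ⟨h1, h2⟩ := h; subst h1
      have hxs : xs = [] := (pvPopMin_none_iff xs).mp hx
      subst hxs
      simp at hy; simp [hy]
    | some p =>
      obtain ⟨q, qrest⟩ := p
      rw [hx] at h
      have hmin := ih q qrest hx
      by_cases hle : pvKey x ≤ pvKey q
      · simp [hle] at h
        obtain ⟨h1, h2⟩ := h; subst h1
        rcases List.mem_cons.mp hy with rfl | hyxs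
        · exact le_refl _
        · exact le_trans hle (hmin y hyxs)
      · simp [hle] at h
        obtain ⟨h1, h2⟩ := h; subst h1
        rcases List.mem_cons.mp hy with rfl | hyxs
        · exact le_of_lt (not_le.mp hle)
        · exact hmin y hyxs

-- sorting a list whose minimum is g equals g followed by the sort of the rest
theorem pvSorted_min_cons (l rest : List (Int × Int × Int)) (g : Int × Int × Int)
    (hperm : l.Perm (g :: rest)) (hmin : ∀ y ∈ l, pvKey g ≤ pvKey y) :
    PySem.List.sorted l pvKey false = g :: PySem.List.sorted rest pvKey false := by
  apply PySem.List.eq_of_perm_of_pairwise_le_of_injective pvKey pvKey_injective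
  · exact ((PySem.List.sorted_perm l pvKey false).trans hperm).trans
      (List.Perm.cons g (PySem.List.sorted_perm rest pvKey false).symm)
  · exact PySem.List.sorted_pairwise l pvKey
  · refine List.pairwise_cons.mpr ⟨?_, PySem.List.sorted_pairwise rest pvKey⟩
    intro y hy
    exact hmin y (hperm.mem_iff.mpr (List.mem_cons_of_mem g
      ((PySem.List.mem_sorted rest pvKey false y).mp hy)))

theorem pvOuter_nonpos (l : List (Int × Int × Int)) (m cur total : Int) (hm : ¬ 0 < m) :
    pvOuter l (m, cur, total) = (m, cur, total) := by
  induction l with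
  | nil => rfl
  | cons t ts ih =>
    show pvOuter ts (pvInner t.1 t.2.1 m cur total) = _
    rw [pvInner, if_neg hm]
    exact ih

theorem pvOuter_cons (g : Int × Int × Int) (t : List (Int × Int × Int)) (s : Int × Int × Int) :
    pvOuter (g :: t) s = pvOuter t (pvInner g.1 g.2.1 s.1 s.2.1 s.2.2) := rfl

-- main lemma: A's heap loop computes B's sorted scan (invariant: every stored tuple is (a-b, a, b))
theorem pvLoopA_eq_pvOuter (m c0 : Int) (gains : List (Int × Int × Int)) (total : Int) :
    (∀ t ∈ gains, t.1 = t.2.1 - t.2.2) →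
    pvLoopA m c0 gains total = (pvOuter (PySem.List.sorted gains pvKey false) (m, c0, total)).2.2 := by
  induction m, c0, gains, total using pvLoopA.induct with
  | case1 m c0 gains total hm hp =>
    intro _
    rw [pvLoopA, if_pos hm, hp]
    have : gains = [] := (pvPopMin_none_iff gains).mp hp
    subst this
    rfl
  | case2 m c0 gains total hm net ai bi rest hp k hk ih =>
    intro hinv
    have hkeq : min m (PySem.Int.floordiv c0 ai) = k := rfl
    have hperm := pvPopMin_perm gains _ _ hp
    have hmin := pvPopMin_min gains _ _ hp
    have hg : (net, ai, bi) ∈ gains := hperm.mem_iff.mpr List.mem_cons_self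
    have hnet : net = ai - bi := hinv _ hg
    have hinv' : ∀ t ∈ rest ++ [(ai - bi, ai, bi)], t.1 = t.2.1 - t.2.2 := by
      intro t ht
      rcases List.mem_append.mp ht with htr | htg
      · exact hinv t (hperm.mem_iff.mpr (List.mem_cons_of_mem _ htr))
      · simp at htg; simp [htg]
    have hsortl : PySem.List.sorted gains pvKey false
        = (net, ai, bi) :: PySem.List.sorted rest pvKey false := pvSorted_min_cons _ _ _ hperm hmin
    have hsortr : PySem.List.sorted (rest ++ [(ai - bi, ai, bi)]) pvKey false
        = (net, ai, bi) :: PySem.List.sorted rest pvKey false := by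
      rw [show ((ai - bi, ai, bi) : Int × Int × Int) = (net, ai, bi) from by rw [hnet]]
      apply pvSorted_min_cons
      · exact List.perm_append_comm
      · intro y hy
        rcases List.mem_append.mp hy with hyr | hyg
        · exact hmin y (hperm.mem_iff.mpr (List.mem_cons_of_mem _ hyr))
        · simp at hyg; simp [hyg]
    have hstep : pvInner net ai m c0 total
        = pvInner net ai (m - k) (c0 - k * ai + k * bi) (total + k) := by
      conv_lhs => rw [pvInner]
      rw [if_pos hm, hkeq, if_pos hk]
      have hc : c0 - k * net = c0 - k * ai + k * bi := by rw [hnet]; ring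
      rw [hc]
    rw [pvLoopA, if_pos hm, hp]
    show (if 0 < k then pvLoopA (m - k) (c0 - k * ai + k * bi) (rest ++ [(ai - bi, ai, bi)]) (total + k)
      else pvLoopA (m - k) (c0 - k * ai + k * bi) rest (total + k))
      = (pvOuter (PySem.List.sorted gains pvKey false) (m, c0, total)).2.2
    rw [if_pos hk, ih hinv', hsortr, hsortl]
    rw [pvOuter_cons, pvOuter_cons]
    exact congrArg (fun s => (pvOuter (PySem.List.sorted rest pvKey false) s).2.2) hstep.symm
  | case3 m c0 gains total hm net ai bi rest hp k hk ih =>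
    intro hinv
    have hkeq : min m (PySem.Int.floordiv c0 ai) = k := rfl
    have hperm := pvPopMin_perm gains _ _ hp
    have hmin := pvPopMin_min gains _ _ hp
    have hg : (net, ai, bi) ∈ gains := hperm.mem_iff.mpr List.mem_cons_self
    have hnet : net = ai - bi := hinv _ hg
    have hinv' : ∀ t ∈ rest, t.1 = t.2.1 - t.2.2 :=
      fun t ht => hinv t (hperm.mem_iff.mpr (List.mem_cons_of_mem _ ht))
    have hsortl : PySem.List.sorted gains pvKey false
        = (net, ai, bi) :: PySem.List.sorted rest pvKey false := pvSorted_min_cons _ _ _ hperm hmin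
    have hstep : pvInner net ai m c0 total = (m - k, c0 - k * ai + k * bi, total + k) := by
      rw [pvInner, if_pos hm, hkeq, if_neg hk]
      have hc : c0 - k * net = c0 - k * ai + k * bi := by rw [hnet]; ring
      rw [hc]
    rw [pvLoopA, if_pos hm, hp]
    show (if 0 < k then pvLoopA (m - k) (c0 - k * ai + k * bi) (rest ++ [(ai - bi, ai, bi)]) (total + k)
      else pvLoopA (m - k) (c0 - k * ai + k * bi) rest (total + k))
      = (pvOuter (PySem.List.sorted gains pvKey false) (m, c0, total)).2.2
    rw [if_neg hk, ih hinv', hsortl]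
    rw [pvOuter_cons]
    exact congrArg (fun s => (pvOuter (PySem.List.sorted rest pvKey false) s).2.2) hstep.symm
  | case4 m c0 gains total hm =>
    intro _
    rw [pvLoopA, if_neg hm, pvOuter_nonpos _ _ _ _ hm]

-- ===== VERDICT (by name: the statement is the Claim_ definition above) =====
theorem max_experience_spec : Claim_equal_max_experience := by
  intro n m a b c _ _
  unfold Spec_max_experience max_experience max_experience_alt
  set gains := (PySem.List.pyRange 0 n 1).map (fun i =>
    (PySem.List.pyGetD a i 0 - PySem.List.pyGetD b i 0, PySem.List.pyGetD a i 0, PySem.List.pyGetD b i 0)) with hgains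
  have hinv : ∀ t ∈ gains, t.1 = t.2.1 - t.2.2 := by
    intro t ht
    rw [hgains] at ht
    obtain ⟨i, _, hi⟩ := List.mem_map.mp ht
    rw [← hi]
  rw [pvLoopA_eq_pvOuter _ _ _ _ hinv]
  by_cases hi : PySem.List.sorted gains pvKey false = [] ∨ m ≤ 0
  · rw [if_pos hi]
    rcases hi with hnil | hm
    · rw [hnil]; rfl
    · rw [pvOuter_nonpos _ _ _ _ (by omega)]
  · rw [if_neg hi]
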